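-- pv_equiv track=rewrite | github.com/ymx0529/NeutronRAG | frontend/app.py | get_all_dash
-- ===== SOURCE A (Python) =====
-- def get_all_dash(s):
--     dash_positions = []
--     i = 0
--     while i < len(s):
--         if s[i] == "-":
--             # 检查当前位置是否属于箭头的一部分
--             if i > 0 and ((s[i:i+2] == "->") or (s[i-1:i+1] == "<-")):
--                 i += 1  # 跳过整个箭头（两个字符），避免误判 "-" 为单独的 "-"
--                 continue
--             dash_positions.append(i)
--         i += 1
--     return dash_positions
-- ===== SOURCE B (Python) =====
-- def get_all_dash(s):
--     # Phase 1: index the arrow-excluded dash positions; Phase 2: filter all dashes.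
--     excluded = set()
--     for j in range(1, len(s)):
--         if s[j] == '>' and s[j-1] == '-' and j > 1:
--             excluded.add(j - 1)
--         if s[j] == '-' and s[j-1] == '<':
--             excluded.add(j)
--     return [i for i, c in enumerate(s) if c == '-' and i not in excluded]
-- ===== Notes on version B (the rewrite author's own statement) =====
-- stated objective: alternative
-- what changed: A's single while-loop that contextually skips dashes inside arrows is replaced by a two-phase decomposition: phase 1 scans the adjacent-character pairs once to build a set of arrow-excluded dash positions (preserving A's i>0 guard so a '->' at index 0 keeps its dash), phase 2 filters all dash positions against that set.
import Mathlib
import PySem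

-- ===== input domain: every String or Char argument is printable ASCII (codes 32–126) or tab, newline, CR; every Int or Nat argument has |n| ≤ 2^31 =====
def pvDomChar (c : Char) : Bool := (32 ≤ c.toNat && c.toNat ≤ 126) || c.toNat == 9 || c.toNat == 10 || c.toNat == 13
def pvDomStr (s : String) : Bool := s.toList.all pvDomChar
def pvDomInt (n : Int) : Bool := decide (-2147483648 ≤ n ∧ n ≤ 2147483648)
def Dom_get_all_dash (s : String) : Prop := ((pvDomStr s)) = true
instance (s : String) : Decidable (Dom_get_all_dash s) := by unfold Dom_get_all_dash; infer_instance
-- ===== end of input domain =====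

-- B replaces A's single contextual skip-scan by a two-phase decomposition: build an index (set)
-- of arrow-excluded dash positions, then filter all dashes against it (alternative; similar cost).


-- ===== PORT A =====
-- A's while-loop; s is carried as its List Char; s[i:i+2] == "->" / s[i-1:i+1] == "<-" become
-- PySem slices compared with the two-character lists (exact: Python string equality is
-- code-point equality; s[i] with 0 ≤ i < len(s) is cs[i]!).
def pvALoop (cs : List Char) (i : Nat) (acc : List Int) : List Int :=
  if _h : i < cs.length then
    if cs[i]! == '-' then
      if decide (i > 0) && ((PySem.List.slice cs (some (i : Int)) (some ((i : Int) + 2)) == (['-', '>'] : List Char))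
          || (PySem.List.slice cs (some ((i : Int) - 1)) (some ((i : Int) + 1)) == (['<', '-'] : List Char))) then
        pvALoop cs (i + 1) acc
      else
        pvALoop cs (i + 1) (acc ++ [(i : Int)])
    else
      pvALoop cs (i + 1) acc
  else acc
termination_by cs.length - i

def get_all_dash (s : String) : List Int := pvALoop s.toList 0 []

-- ===== PORT B =====
-- Phase-1 loop body for index j (1 ≤ j < len(s)): maybe record j-1 (a "->" start with j > 1)
-- and j (a "<-" end) as excluded.  s[j] / s[j-1] are always in range here, so they are
-- pyGetD with a dummy default (exact on every reached index).
def pvBStep (cs : List Char) (ex : PySem.Set Int) (j : Int) : PySem.Set Int :=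
  let ex := if (PySem.List.pyGetD cs j ' ' == '>') && (PySem.List.pyGetD cs (j - 1) ' ' == '-') && decide (j > 1)
            then PySem.Set.add ex (j - 1) else ex
  if (PySem.List.pyGetD cs j ' ' == '-') && (PySem.List.pyGetD cs (j - 1) ' ' == '<')
  then PySem.Set.add ex j else ex

def pvBExcluded (cs : List Char) : PySem.Set Int :=
  (PySem.List.pyRange 1 (cs.length : Int) 1).foldl (pvBStep cs) PySem.Set.empty

-- Phase 2: [i for i, c in enumerate(s) if c == '-' and i not in excluded]
def get_all_dash_alt (s : String) : List Int :=
  let cs := s.toList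
  let ex := pvBExcluded cs
  (PySem.List.enumerate cs 0).filterMap (fun p =>
    if (p.2 == '-') && !(PySem.Set.contains ex p.1) then some p.1 else none)

-- ===== PRECONDITION & SPEC =====
def Spec_get_all_dash (s : String) (out : List Int) : Prop := out = get_all_dash_alt s
instance (s : String) (out : List Int) : Decidable (Spec_get_all_dash s out) := by unfold Spec_get_all_dash; infer_instance

-- ===== CLAIM (what is proved, stated in full; the proofs are below) =====
def Claim_equal_get_all_dash : Prop := ∀ (s : String), Dom_get_all_dash s → Spec_get_all_dash s (get_all_dash s)

-- ===== LEMMAS AND PROOFS =====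

-- common characterisation: index j is kept iff it holds '-' and is not part of an arrow
-- (respecting A's i > 0 guard, under which a "->" at index 0 keeps its dash)
def pvKeep (cs : List Char) (j : Nat) : Bool :=
  (cs[j]? == some '-') && !(decide (0 < j) && ((cs[j + 1]? == some '>') || (cs[j - 1]? == some '<')))

def pvIdeal (cs : List Char) (i : Nat) : List Int :=
  (List.range' i (cs.length - i)).filterMap (fun j => if pvKeep cs j then some (j : Int) else none)

lemma pvSlice1 (cs : List Char) (i : Nat) (h : i < cs.length) (hd : cs[i] = '-') :
    (PySem.List.slice cs (some (i : Int)) (some ((i : Int) + 2)) == (['-', '>'] : List Char))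
      = (decide (i + 1 < cs.length) && (cs[i + 1]? == some '>')) := by
  have h2 : ((i : Int) + 2) = ((i + 2 : Nat) : Int) := by push_cast; ring
  rw [h2, PySem.List.slice_natCast]
  have h3 : i + 2 - i = 2 := by omega
  rw [h3, List.drop_eq_getElem_cons h, hd]
  by_cases h1 : i + 1 < cs.length
  · rw [List.drop_eq_getElem_cons h1]
    simp [List.take, h1]
  · have hnil : cs.drop (i + 1) = [] := by rw [List.drop_eq_nil_iff]; omega
    rw [hnil]
    simp [h1]

lemma pvSlice2 (cs : List Char) (i : Nat) (h0 : 0 < i) (h : i < cs.length) (hd : cs[i] = '-') :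
    (PySem.List.slice cs (some ((i : Int) - 1)) (some ((i : Int) + 1)) == (['<', '-'] : List Char))
      = (cs[i - 1]? == some '<') := by
  have e1 : ((i : Int) - 1) = ((i - 1 : Nat) : Int) := by omega
  have e2 : ((i : Int) + 1) = ((i - 1 + 2 : Nat) : Int) := by omega
  rw [e1, e2, PySem.List.slice_natCast]
  have h3 : i - 1 + 2 - (i - 1) = 2 := by omega
  have h1 : i - 1 < cs.length := by omega
  rw [h3, List.drop_eq_getElem_cons h1]
  have e4 : i - 1 + 1 = i := by omega
  rw [e4, List.drop_eq_getElem_cons h, hd]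
  simp [List.take, List.getElem?_eq_getElem h1]

lemma pvALoop_eq (cs : List Char) (k : Nat) :
    ∀ (i : Nat), cs.length - i = k → ∀ acc, pvALoop cs i acc = acc ++ pvIdeal cs i := by
  induction k with
  | zero =>
    intro i hi acc
    have h : ¬ i < cs.length := by omega
    rw [pvALoop]
    simp [h, pvIdeal, hi]
  | succ k ih =>
    intro i hi acc
    have h : i < cs.length := by omega
    have hstep : pvIdeal cs i = (if pvKeep cs i then [(i : Int)] else []) ++ pvIdeal cs (i + 1) := by
      unfold pvIdeal
      rw [hi, List.range'_succ, List.filterMap_cons]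
      have : cs.length - (i + 1) = k := by omega
      rw [this]
      by_cases hk : pvKeep cs i <;> simp [hk]
    rw [pvALoop]
    simp only [h, dif_pos]
    have hgb : cs[i]! = cs[i] := getElem!_pos cs i h
    by_cases hd : cs[i] = '-'
    · have harr : (decide (i > 0) && ((PySem.List.slice cs (some (i : Int)) (some ((i : Int) + 2)) == (['-', '>'] : List Char))
          || (PySem.List.slice cs (some ((i : Int) - 1)) (some ((i : Int) + 1)) == (['<', '-'] : List Char))))
          = !(pvKeep cs i) := by
        by_cases h0 : 0 < i
        · rw [pvSlice1 cs i h hd, pvSlice2 cs i h0 h hd]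
          unfold pvKeep
          simp [h0, List.getElem?_eq_getElem h, hd]
          by_cases hb : i + 1 < cs.length
          · simp [hb]
          · simp [hb]
        · unfold pvKeep
          simp [h0, List.getElem?_eq_getElem h, hd]
      rw [hgb, hd, harr, if_pos (show ('-' == '-') = true from rfl), hstep]
      by_cases hk : pvKeep cs i
      · rw [hk, show (!true) = false from rfl, if_neg (by decide), ih (i + 1) (by omega)]
        simp
      · rw [Bool.not_eq_true] at hk
        rw [hk, show (!false) = true from rfl, if_pos rfl, ih (i + 1) (by omega)]
        simp
    · rw [hgb]
      rw [if_neg (by simp [hd])]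
      rw [ih (i + 1) (by omega), hstep]
      have hk : pvKeep cs i = false := by
        unfold pvKeep
        simp [List.getElem?_eq_getElem h, hd]
      simp [hk]

lemma pvBStep_mem (cs : List Char) (ex : PySem.Set Int) (j : Int) (x : Int) :
    x ∈ pvBStep cs ex j ↔ x ∈ ex ∨
      ((PySem.List.pyGetD cs j ' ' = '>' ∧ PySem.List.pyGetD cs (j - 1) ' ' = '-' ∧ 1 < j) ∧ x = j - 1) ∨
      ((PySem.List.pyGetD cs j ' ' = '-' ∧ PySem.List.pyGetD cs (j - 1) ' ' = '<') ∧ x = j) := by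
  unfold pvBStep
  split_ifs with hA hB hB <;>
    simp only [Bool.and_eq_true, beq_iff_eq, decide_eq_true_eq, not_and] at hA hB <;>
    simp only [PySem.Set.mem_add] <;> tauto

-- membership in the phase-1 set after processing j = 1 .. m-1
lemma pvEx_mem (cs : List Char) (m : Nat) (hm : m ≤ cs.length) (x : Int) :
    x ∈ (PySem.List.pyRange 1 (m : Int) 1).foldl (pvBStep cs) PySem.Set.empty ↔
      ∃ i : Nat, x = (i : Int) ∧ 1 ≤ i ∧
        ((i + 1 < m ∧ cs[i]? = some '-' ∧ cs[i + 1]? = some '>') ∨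
         (i < m ∧ cs[i]? = some '-' ∧ cs[i - 1]? = some '<')) := by
  induction m with
  | zero =>
    rw [PySem.List.pyRange_one_eq_nil (by omega)]
    simp only [List.foldl_nil]
    constructor
    · intro hx; cases hx
    · rintro ⟨i, rfl, h1, (⟨h2, _⟩ | ⟨h2, _⟩)⟩ <;> omega
  | succ m ih =>
    by_cases hm1 : 1 ≤ m
    · have hc : ((m + 1 : Nat) : Int) = (m : Int) + 1 := by push_cast; ring
      rw [hc, PySem.List.pyRange_one_succ_right (by omega), List.foldl_append]
      simp only [List.foldl_cons, List.foldl_nil]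
      rw [pvBStep_mem, ih (by omega)]
      have hmlt : m < cs.length := by omega
      have hm1lt : m - 1 < cs.length := by omega
      have g1 : PySem.List.pyGetD cs (m : Int) ' ' = cs[m] := by
        rw [PySem.List.pyGetD_natCast]; exact List.getD_eq_getElem cs ' ' hmlt
      have g2 : PySem.List.pyGetD cs ((m : Int) - 1) ' ' = cs[m - 1] := by
        have e : ((m : Int) - 1) = ((m - 1 : Nat) : Int) := by omega
        rw [e, PySem.List.pyGetD_natCast]; exact List.getD_eq_getElem cs ' ' hm1lt
      constructor
      · rintro (⟨i, hx, h1, hcase⟩ | ⟨⟨ha, hb, hj⟩, hx⟩ | ⟨⟨ha, hb⟩, hx⟩)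
        · exact ⟨i, hx, h1, by rcases hcase with ⟨h2, h3⟩ | ⟨h2, h3⟩; exacts [Or.inl ⟨by omega, h3⟩, Or.inr ⟨by omega, h3⟩]⟩
        · refine ⟨m - 1, by omega, by omega, Or.inl ⟨by omega, ?_, ?_⟩⟩
          · rw [List.getElem?_eq_getElem hm1lt, g2.symm, hb]
          · have e : m - 1 + 1 = m := by omega
            rw [e, List.getElem?_eq_getElem hmlt, g1.symm, ha]
        · refine ⟨m, by omega, by omega, Or.inr ⟨by omega, ?_, ?_⟩⟩
          · rw [List.getElem?_eq_getElem hmlt, g1.symm, ha]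
          · rw [List.getElem?_eq_getElem hm1lt, g2.symm, hb]
      · rintro ⟨i, hx, h1, (⟨h2, h3, h4⟩ | ⟨h2, h3, h4⟩)⟩
        · by_cases hb : i + 1 < m
          · exact Or.inl ⟨i, hx, h1, Or.inl ⟨hb, h3, h4⟩⟩
          · -- i + 1 = m : the "->" rule fires at j = m
            have hieq : i = m - 1 := by omega
            refine Or.inr (Or.inl ⟨⟨?_, ?_, by omega⟩, by omega⟩)
            · rw [g1]
              have := h4; rw [List.getElem?_eq_getElem (by omega : i + 1 < cs.length)] at this
              simpa [show i + 1 = m by omega] using this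
            · rw [g2]
              have := h3; rw [List.getElem?_eq_getElem (by omega : i < cs.length)] at this
              simpa [hieq] using this
        · by_cases hb : i < m
          · exact Or.inl ⟨i, hx, h1, Or.inr ⟨hb, h3, h4⟩⟩
          · -- i = m : the "<-" rule fires at j = m
            have hieq : i = m := by omega
            refine Or.inr (Or.inr ⟨⟨?_, ?_⟩, by omega⟩)
            · rw [g1]
              have := h3; rw [List.getElem?_eq_getElem (by omega : i < cs.length)] at this
              simpa [hieq] using this
            · rw [g2]
              have := h4; rw [List.getElem?_eq_getElem (by omega : i - 1 < cs.length)] at this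
              simpa [hieq] using this
    · have hm0 : m = 0 := by omega
      subst hm0
      rw [show ((1 : Nat) : Int) = 1 from rfl, PySem.List.pyRange_one_eq_nil (by omega)]
      simp only [List.foldl_nil]
      constructor
      · intro hx; cases hx
      · rintro ⟨i, rfl, h1, (⟨h2, _⟩ | ⟨h2, _⟩)⟩ <;> omega

lemma pvContains (cs : List Char) (j : Nat) (hj : j < cs.length) :
    PySem.Set.contains (pvBExcluded cs) (j : Int)
      = (decide (0 < j) && ((cs[j]? == some '-') && ((cs[j + 1]? == some '>') || (cs[j - 1]? == some '<')))) := by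
  rw [Bool.eq_iff_iff, PySem.Set.contains_iff, pvBExcluded, pvEx_mem cs cs.length le_rfl]
  simp only [Bool.and_eq_true, Bool.or_eq_true, decide_eq_true_eq, beq_iff_eq]
  constructor
  · rintro ⟨i, hij, h1, hcase⟩
    have hi : j = i := by exact_mod_cast hij
    subst hi
    rcases hcase with ⟨_, hd, hg⟩ | ⟨_, hd, hl⟩
    · exact ⟨by omega, hd, Or.inl hg⟩
    · exact ⟨by omega, hd, Or.inr hl⟩
  · rintro ⟨h0, hd, hg | hl⟩
    · obtain ⟨hb, _⟩ := List.getElem?_eq_some_iff.mp hg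
      exact ⟨j, rfl, by omega, Or.inl ⟨hb, hd, hg⟩⟩
    · exact ⟨j, rfl, by omega, Or.inr ⟨hj, hd, hl⟩⟩

lemma pvCondEq (cs : List Char) (j : Nat) (hj : j < cs.length) :
    ((cs[j]'hj == '-') && !(PySem.Set.contains (pvBExcluded cs) (j : Int))) = pvKeep cs j := by
  rw [pvContains cs j hj]
  unfold pvKeep
  rw [List.getElem?_eq_getElem hj]
  by_cases hc : cs[j] = '-'
  · simp [hc]
  · have hcb : (cs[j] == '-') = false := by simp [hc]
    simp [hcb]

lemma pvAlt_eq (s : String) : get_all_dash_alt s = pvIdeal s.toList 0 := by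
  simp only [get_all_dash_alt]
  rw [PySem.List.enumerate_eq_map_pyRange s.toList ' ', List.filterMap_map]
  have hlen : PySem.List.len s.toList = ((s.toList.length : Nat) : Int) := by
    simp [PySem.List.len]
  rw [hlen, PySem.List.pyRange_zero_nat, List.filterMap_map]
  unfold pvIdeal
  rw [Nat.sub_zero, ← List.range_eq_range']
  apply List.filterMap_congr
  intro j hjm
  have hj : j < s.toList.length := List.mem_range.mp hjm
  simp only [Function.comp_apply, PySem.List.pyGetD_natCast, List.getD_eq_getElem s.toList ' ' hj]
  rw [pvCondEq s.toList j hj]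

-- ===== VERDICT (by name: the statement is the Claim_ definition above) =====
theorem get_all_dash_spec : Claim_equal_get_all_dash := by
  intro s _
  unfold Spec_get_all_dash
  rw [pvAlt_eq, get_all_dash, pvALoop_eq s.toList (s.toList.length - 0) 0 rfl []]
  simp
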